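-- pv_equiv track=rewrite | github.com/peterursem/Advent_Of_Code_2024 | Day2/part_a.py | signs_match
-- ===== SOURCE A (Python) =====
-- def signs_match(deltas: list) -> int:
--     infraction_totals = []
--     for expected in (True, False):
--         infraction_count = 0
--         for value in deltas:
--             if (value > 0) != expected:
--                 infraction_count += 1
--         infraction_totals.append(infraction_count)
--     return min(infraction_totals)
-- ===== SOURCE B (Python) =====
-- def signs_match(deltas: list) -> int:
--     pos = sum(1 for v in deltas if v > 0)
--     return min(pos, len(deltas) - pos)
-- ===== Notes on version B (the rewrite author's own statement) =====
-- stated objective: simpler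
-- what changed: Counts positives in one pass and uses the complement identity min(pos, n-pos), removing A's outer loop over the two expectations and its second scan of deltas.
import Mathlib
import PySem

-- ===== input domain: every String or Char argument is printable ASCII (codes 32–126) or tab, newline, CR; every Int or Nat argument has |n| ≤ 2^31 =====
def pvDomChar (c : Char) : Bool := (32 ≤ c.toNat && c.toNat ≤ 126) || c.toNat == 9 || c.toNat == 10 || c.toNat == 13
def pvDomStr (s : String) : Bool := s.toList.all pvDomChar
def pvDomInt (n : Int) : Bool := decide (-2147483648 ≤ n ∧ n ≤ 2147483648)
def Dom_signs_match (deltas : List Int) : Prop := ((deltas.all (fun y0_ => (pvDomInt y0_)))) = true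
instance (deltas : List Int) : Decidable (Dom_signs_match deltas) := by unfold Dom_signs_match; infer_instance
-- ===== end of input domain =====

-- B counts positives once and returns min(pos, len-pos) via the complement identity, removing A's outer loop over the two expectations (objective: simpler).


-- ===== PORT A =====
-- literal port: outer loop over (True, False), inner counting loop, then min of the
-- two-element list ('.getD 0' discharges the Option of min?; the list is never empty)
def signs_match (deltas : List Int) : Int :=
  let infraction_totals : List Int :=
    [true, false].foldl (fun totals expected =>
      totals ++ [deltas.foldl (fun c value => if decide (value > 0) ≠ expected then c + 1 else c) (0 : Int)]) []
  (PySem.List.min? infraction_totals (fun x => x)).getD 0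

-- ===== PORT B =====
def signs_match_alt (deltas : List Int) : Int :=
  let pos : Int := deltas.foldl (fun s v => if v > 0 then s + 1 else s) 0
  min pos ((deltas.length : Int) - pos)

-- ===== PRECONDITION & SPEC =====
def Spec_signs_match (deltas : List Int) (out : Int) : Prop := out = signs_match_alt deltas
instance (deltas : List Int) (out : Int) : Decidable (Spec_signs_match deltas out) := by unfold Spec_signs_match; infer_instance

-- ===== CLAIM (what is proved, stated in full; the proofs are below) =====
def Claim_equal_signs_match : Prop := ∀ (deltas : List Int), Dom_signs_match deltas → Spec_signs_match deltas (signs_match deltas)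

-- ===== LEMMAS AND PROOFS =====

-- the two counts sum to |deltas| (accumulators generalized)
theorem pv_counts_sum (d : List Int) : ∀ (a b : Int),
    d.foldl (fun c v => if decide (v > 0) ≠ true then c + 1 else c) a
      + d.foldl (fun c v => if decide (v > 0) ≠ false then c + 1 else c) b
      = a + b + (d.length : Int) := by
  induction d with
  | nil => intro a b; simp
  | cons v t ih =>
    intro a b
    simp only [List.foldl_cons, List.length_cons]
    by_cases h : v > 0
    · rw [if_neg (by simp [h]), if_pos (by simp [h]), ih]; push_cast; ring
    · rw [if_pos (by simp [h]), if_neg (by simp [h]), ih]; push_cast; ring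

theorem pv_pos_fold_eq (d : List Int) : ∀ (a : Int),
    d.foldl (fun c v => if decide (v > 0) ≠ false then c + 1 else c) a
      = d.foldl (fun s v => if v > 0 then s + 1 else s) a := by
  induction d with
  | nil => intro a; rfl
  | cons v t ih =>
    intro a
    simp only [List.foldl_cons, ih]
    by_cases h : v > 0 <;> simp [h]

-- ===== VERDICT (by name: the statement is the Claim_ definition above) =====
theorem signs_match_spec : Claim_equal_signs_match := by
  intro deltas _
  unfold Spec_signs_match signs_match signs_match_alt
  simp only [List.foldl, List.nil_append, List.singleton_append, PySem.List.min?_id_cons,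
    Option.getD_some]
  have hsum := pv_counts_sum deltas 0 0
  rw [pv_pos_fold_eq deltas 0] at hsum ⊢
  omega
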